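-- pv_equiv track=rewrite | github.com/jwilner/project_euler | problem_432.py | classic_sum
-- ===== SOURCE A (Python) =====
-- def steps_with_euclids_algorithm(x,y):
-- 	i = 0
-- 	while y != 0:
-- 		i += 1
-- 		x, y = y, x % y
-- 	return i
--
-- def classic_sum(n):
-- 	dictionary = {(x,y):0 for x in range(1,n+1) for y in range(1,x+1)}
-- 	for (x,y) in list(dictionary.keys()):
-- 		if dictionary[(x,y)]:
-- 			continue
-- 		steps = steps_with_euclids_algorithm(x,y)
-- 		if x != y:
-- 			dictionary[(x,y)],dictionary[(y,x)] = steps,steps + 1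
-- 		else:
-- 			dictionary[(x,y)] = steps
-- 	return dictionary
-- ===== SOURCE B (Python) =====
-- def classic_sum(n):
--     # Memoized DP: the step count of (x, y) is one more than that of the reduced
--     # pair (y, x % y), which is an already-computed smaller table entry, so no
--     # per-pair Euclid loop is run.
--     s = [[0]]  # s[x][y] = number of Euclid steps for (x, y); row 0 is a placeholder
--     for x in range(1, n + 1):
--         row = [0]
--         for y in range(1, x + 1):
--             g = x % y
--             row.append(1 if g == 0 else 1 + s[y][g])
--         s.append(row)
--     d = {(x, y): s[x][y] for x in range(1, n + 1) for y in range(1, x + 1)}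
--     for x in range(1, n + 1):
--         for y in range(1, x):
--             d[(y, x)] = s[x][y] + 1
--     return d
-- ===== Notes on version B (the rewrite author's own statement) =====
-- stated objective: alternative
-- what changed: Instead of running the whole Euclid loop independently for every pair, B fills a memo table in increasing order of the larger element using the recurrence that the step count of a pair is one more than the step count of the reduced pair, so each table entry is derived from a single already-computed smaller entry; the dict and the swapped pairs are then emitted in the same insertion order as A.
import Mathlib
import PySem

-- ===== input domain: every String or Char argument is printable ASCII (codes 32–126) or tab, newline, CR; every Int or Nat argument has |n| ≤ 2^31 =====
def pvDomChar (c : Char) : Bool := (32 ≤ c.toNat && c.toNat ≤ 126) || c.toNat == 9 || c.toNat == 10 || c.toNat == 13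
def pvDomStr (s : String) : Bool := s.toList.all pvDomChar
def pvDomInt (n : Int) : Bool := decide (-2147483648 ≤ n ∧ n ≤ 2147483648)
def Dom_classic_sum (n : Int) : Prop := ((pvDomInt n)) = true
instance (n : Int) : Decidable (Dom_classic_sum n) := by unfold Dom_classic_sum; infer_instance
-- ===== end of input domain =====

-- B: instead of re-running Euclid's loop for every pair, it fills a memo table row by
-- row via the recurrence on the reduced pair; same dict, same insertion order as A.

-- ===== PORT A =====

-- while y != 0: i += 1; x, y = y, x % y   (terminates since |x % y| < |y|)
def pvEuclidGo (x y i : Int) : Int :=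
  if h : y = 0 then i else pvEuclidGo y (PySem.Int.mod x y) (i + 1)
termination_by y.natAbs
decreasing_by
  rcases lt_trichotomy y 0 with hy | hy | hy
  · have := PySem.Int.mod_neg_bounds x hy; omega
  · exact absurd hy h
  · have h1 := PySem.Int.mod_nonneg x hy
    have h2 := PySem.Int.mod_lt x hy; omega

def steps_with_euclids_algorithm (x y : Int) : Int := pvEuclidGo x y 0

-- the key list of {(x,y): 0 for x in range(1,n+1) for y in range(1,x+1)}
def pvKeys (n : Int) : List (Int × Int) :=
  (PySem.List.pyRange 1 (n + 1)).flatMap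
    (fun x => (PySem.List.pyRange 1 (x + 1)).map (fun y => (x, y)))

-- the body of A's `for (x,y) in list(dictionary.keys()):` loop
-- (every key of the comprehension is present, so dictionary[(x,y)] is d.getD k 0 here,
-- and Python's truthiness test `if dictionary[(x,y)]:` is `≠ 0`)
def pvLoopA (d : PySem.Dict (Int × Int) Int) (k : Int × Int) : PySem.Dict (Int × Int) Int :=
  if d.getD k 0 ≠ 0 then d
  else
    let steps := steps_with_euclids_algorithm k.1 k.2
    if k.1 ≠ k.2 then (d.insert k steps).insert (k.2, k.1) (steps + 1)
    else d.insert k steps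

def classic_sum (n : Int) : List (Int × Int × Int) :=
  let d0 : PySem.Dict (Int × Int) Int :=
    (pvKeys n).foldl (fun d k => d.insert k 0) PySem.Dict.empty
  let d := d0.keys.foldl pvLoopA d0
  d.items.map (fun p => (p.1.1, p.1.2, p.2))

-- ===== PORT B =====

-- row.append(1 if g == 0 else 1 + s[y][g])   (every index is in range here,
-- so Python's s[y][g] is exactly pyGetD with an unused default)
def pvStepRow (s : List (List Int)) (x : Int) (row : List Int) (y : Int) : List Int :=
  let g := PySem.Int.mod x y
  row ++ [if g = 0 then 1 else 1 + PySem.List.pyGetD (PySem.List.pyGetD s y []) g 0]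

-- the DP table s: s[x][y] = Euclid step count of (x,y), rows appended in order
def pvBuildS (n : Int) : List (List Int) :=
  (PySem.List.pyRange 1 (n + 1)).foldl
    (fun s x => s ++ [(PySem.List.pyRange 1 (x + 1)).foldl (pvStepRow s x) [0]]) [[0]]

-- d[(x, y)] = s[x][y] for y in range(1, x+1)
def pvFill (s : List (List Int)) (d : PySem.Dict (Int × Int) Int) (x : Int) :
    PySem.Dict (Int × Int) Int :=
  (PySem.List.pyRange 1 (x + 1)).foldl
    (fun d y => d.insert (x, y) (PySem.List.pyGetD (PySem.List.pyGetD s x []) y 0)) d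

-- d[(y, x)] = s[x][y] + 1 for y in range(1, x)
def pvSwapFill (s : List (List Int)) (d : PySem.Dict (Int × Int) Int) (x : Int) :
    PySem.Dict (Int × Int) Int :=
  (PySem.List.pyRange 1 x).foldl
    (fun d y => d.insert (y, x) (PySem.List.pyGetD (PySem.List.pyGetD s x []) y 0 + 1)) d

def classic_sum_alt (n : Int) : List (Int × Int × Int) :=
  let s := pvBuildS n
  let d1 := (PySem.List.pyRange 1 (n + 1)).foldl (pvFill s) PySem.Dict.empty
  let d2 := (PySem.List.pyRange 1 (n + 1)).foldl (pvSwapFill s) d1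
  d2.items.map (fun p => (p.1.1, p.1.2, p.2))

-- ===== PRECONDITION & SPEC =====
def Spec_classic_sum (n : Int) (out : List (Int × Int × Int)) : Prop := out = classic_sum_alt n
instance (n : Int) (out : List (Int × Int × Int)) : Decidable (Spec_classic_sum n out) := by unfold Spec_classic_sum; infer_instance

-- ===== CLAIM (what is proved, stated in full; the proofs are below) =====
def Claim_equal_classic_sum : Prop := ∀ (n : Int), Dom_classic_sum n → Spec_classic_sum n (classic_sum n)

-- ===== LEMMAS AND PROOFS =====

def pvSN (x y : Int) : Int :=
  if h : y = 0 then 0 else 1 + pvSN y (PySem.Int.mod x y)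
termination_by y.natAbs
decreasing_by
  rcases lt_trichotomy y 0 with hy | hy | hy
  · have := PySem.Int.mod_neg_bounds x hy; omega
  · exact absurd hy h
  · have h1 := PySem.Int.mod_nonneg x hy
    have h2 := PySem.Int.mod_lt x hy; omega

lemma pvEuclidGo_eq (x y i : Int) : pvEuclidGo x y i = i + pvSN x y := by
  induction x, y, i using pvEuclidGo.induct with
  | case1 x i => rw [pvEuclidGo, pvSN]; simp
  | case2 x y i h ih => rw [pvEuclidGo, pvSN]; simp [h, ih]; ring

def pvKR (x : Nat) : List (Int × Int) :=
  (List.range x).map (fun (j : Nat) => ((x : Int), (j : Int) + 1))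

def pvKL : Nat → List (Int × Int)
  | 0 => []
  | m + 1 => pvKL m ++ pvKR (m + 1)

lemma mem_pvKR {x : Nat} {p : Int × Int} :
    p ∈ pvKR x ↔ p.1 = (x : Int) ∧ 1 ≤ p.2 ∧ p.2 ≤ (x : Int) := by
  obtain ⟨a, b⟩ := p
  simp [pvKR, List.mem_map, List.mem_range, Prod.ext_iff]
  constructor
  · rintro ⟨j, hj, rfl, rfl⟩
    omega
  · rintro ⟨h1, h2, h3⟩
    exact ⟨(b - 1).toNat, by omega, h1.symm, by omega⟩

lemma mem_pvKL {m : Nat} {p : Int × Int} :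
    p ∈ pvKL m ↔ 1 ≤ p.2 ∧ p.2 ≤ p.1 ∧ p.1 ≤ (m : Int) := by
  induction m with
  | zero => simp [pvKL]; omega
  | succ m ih =>
    simp only [pvKL, List.mem_append, ih, mem_pvKR]
    push_cast; omega

def pvLt (p q : Int × Int) : Prop := p.1 < q.1 ∨ (p.1 = q.1 ∧ p.2 < q.2)

lemma pvKL_pairwise (m : Nat) : (pvKL m).Pairwise pvLt := by
  induction m with
  | zero => simp [pvKL]
  | succ m ih =>
    rw [pvKL, List.pairwise_append]
    refine ⟨ih, ?_, ?_⟩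
    · rw [pvKR]
      refine List.Pairwise.map (f := fun (j : Nat) => (((m + 1 : Nat) : Int), (j : Int) + 1))
        ?_ List.pairwise_lt_range
      intro a b h
      refine Or.inr ⟨rfl, ?_⟩
      simp only
      omega
    · intro a ha b hb
      rw [mem_pvKL] at ha; rw [mem_pvKR] at hb
      left; omega

lemma pvKL_nodup (m : Nat) : (pvKL m).Nodup := by
  refine (pvKL_pairwise m).imp ?_
  intro a b h hab
  subst hab; unfold pvLt at h; omega

lemma pvRange1 (m : Nat) :
    PySem.List.pyRange 1 ((m : Int) + 1) = (List.range m).map (fun (j : Nat) => (j : Int) + 1) := by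
  induction m with
  | zero => rfl
  | succ m ih =>
    have h : ((m + 1 : Nat) : Int) + 1 = ((m : Int) + 1) + 1 := by push_cast; ring
    rw [h, PySem.List.pyRange_one_succ_right (by omega), ih, List.range_succ]
    simp

lemma pvRange1_neg {b : Int} (h : b ≤ 1) : PySem.List.pyRange 1 b = [] := by
  rw [List.eq_nil_iff_forall_not_mem]
  intro x hx; rw [PySem.List.mem_pyRange_one] at hx; omega

lemma pvSN_zero (x : Int) : pvSN x 0 = 0 := by rw [pvSN]; simp

lemma pvSN_step (x y : Int) (h : y ≠ 0) : pvSN x y = 1 + pvSN y (PySem.Int.mod x y) := by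
  rw [pvSN]; simp [h]

lemma pvMod_self_ne {x y : Int} (hne : PySem.Int.mod x y ≠ 0) (hyx : y ≤ x) : y < x := by
  rcases lt_or_eq_of_le hyx with h | h
  · exact h
  · subst h
    exact absurd ((PySem.Int.mod_eq_zero_iff_dvd y y).mpr dvd_rfl) hne

lemma pvSN_compute {x y : Int} (hy : 1 ≤ y) :
    pvSN x y = (if PySem.Int.mod x y = 0 then 1
                else 1 + pvSN y (PySem.Int.mod x y)) := by
  rw [pvSN_step x y (by omega)]
  split_ifs with h
  · rw [h, pvSN_zero]; ring
  · rfl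

def pvRowP (x k : Nat) : List Int :=
  0 :: (List.range k).map (fun (j : Nat) => pvSN (x : Int) ((j : Int) + 1))

def pvSL : Nat → List (List Int)
  | 0 => [[0]]
  | m + 1 => pvSL m ++ [pvRowP (m + 1) (m + 1)]

lemma pvRowP_succ (x k : Nat) :
    pvRowP x (k + 1) = pvRowP x k ++ [pvSN (x : Int) ((k : Int) + 1)] := by
  simp [pvRowP, List.range_succ]

lemma pvSL_length (m : Nat) : (pvSL m).length = m + 1 := by
  induction m with
  | zero => rfl
  | succ m ih => simp [pvSL, ih]

lemma pvSL_getD {m x : Nat} (h1 : 1 ≤ x) (h2 : x ≤ m) : (pvSL m).getD x [] = pvRowP x x := by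
  induction m with
  | zero => omega
  | succ m ih =>
    rcases Nat.lt_or_ge x (m + 1) with h | h
    · rw [pvSL, List.getD_append _ _ _ _ (by rw [pvSL_length]; omega)]
      exact ih (by omega)
    · have hx : x = m + 1 := by omega
      subst hx
      rw [pvSL, show m + 1 = (pvSL m).length from (pvSL_length m).symm]
      simp [List.getD_eq_getElem?_getD]

lemma pvRowP_getD {x k g : Nat} (hg : 1 ≤ g) (hk : g ≤ k) :
    (pvRowP x k).getD g 0 = pvSN (x : Int) (g : Int) := by
  obtain ⟨g', rfl⟩ : ∃ g', g = g' + 1 := ⟨g - 1, by omega⟩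
  rw [pvRowP, List.getD_cons_succ, PySem.List.getD_map_range _ _ _ _ (by omega)]
  exact congrArg _ (by push_cast; ring)

lemma pvSLookup {m : Nat} {x y : Int} (hy : 1 ≤ y) (hyx : y ≤ x) (hx : x ≤ (m : Int)) :
    PySem.List.pyGetD (PySem.List.pyGetD (pvSL m) x []) y 0 = pvSN x y := by
  have hx' : x = ((x.toNat : Nat) : Int) := by omega
  have hy' : y = ((y.toNat : Nat) : Int) := by omega
  rw [hx', hy', PySem.List.pyGetD_natCast, PySem.List.pyGetD_natCast,
    pvSL_getD (by omega) (by omega), pvRowP_getD (by omega) (by omega)]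

lemma pvRowFoldAux (m k : Nat) (hk : k ≤ m + 1) :
    ((List.range k).map (fun (j : Nat) => (j : Int) + 1)).foldl
      (pvStepRow (pvSL m) (((m + 1 : Nat) : Int))) [0] = pvRowP (m + 1) k := by
  induction k with
  | zero => rfl
  | succ k ih =>
    rw [List.range_succ, List.map_append, List.foldl_append, ih (by omega)]
    simp only [List.map_cons, List.map_nil, List.foldl_cons, List.foldl_nil]
    rw [pvRowP_succ, pvStepRow]
    have hy : (1 : Int) ≤ (k : Int) + 1 := by omega
    have hyx : (k : Int) + 1 ≤ ((m + 1 : Nat) : Int) := by push_cast; omega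
    congr 1
    rw [pvSN_compute hy]
    split_ifs with h
    · rfl
    · have hlt : (k : Int) + 1 < ((m + 1 : Nat) : Int) := pvMod_self_ne h hyx
      have hg1 : 1 ≤ PySem.Int.mod ((m + 1 : Nat) : Int) ((k : Int) + 1) := by
        have := PySem.Int.mod_nonneg ((m + 1 : Nat) : Int) (b := (k : Int) + 1) (by omega)
        omega
      have hg2 := PySem.Int.mod_lt ((m + 1 : Nat) : Int) (b := (k : Int) + 1) (by omega)
      rw [pvSLookup (m := m) hg1 (by omega) (by push_cast at hlt ⊢; omega)]

lemma pvRowFold (m : Nat) :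
    (PySem.List.pyRange 1 ((((m : Nat) : Int) + 1) + 1)).foldl
      (pvStepRow (pvSL m) (((m : Nat) : Int) + 1)) [0] = pvRowP (m + 1) (m + 1) := by
  have h : (((m : Nat) : Int) + 1) + 1 = ((m + 1 : Nat) : Int) + 1 := by push_cast; ring
  rw [h, pvRange1 (m + 1)]
  have h2 : ((m : Nat) : Int) + 1 = ((m + 1 : Nat) : Int) := by push_cast; ring
  rw [h2]
  exact pvRowFoldAux m (m + 1) (by omega)

lemma pvBuildS_nat (m : Nat) :
    ((List.range m).map (fun (j : Nat) => (j : Int) + 1)).foldl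
      (fun s x => s ++ [(PySem.List.pyRange 1 (x + 1)).foldl (pvStepRow s x) [0]]) [[0]]
      = pvSL m := by
  induction m with
  | zero => rfl
  | succ m ih =>
    rw [List.range_succ, List.map_append, List.foldl_append, ih]
    simp only [List.map_cons, List.map_nil, List.foldl_cons, List.foldl_nil]
    rw [pvSL]
    congr 1
    rw [← pvRowFold m]

lemma pvBuildS_eq (n : Int) : pvBuildS n = pvSL n.toNat := by
  rw [pvBuildS]
  rcases (by omega : 0 ≤ n ∨ n < 0) with h | h
  · rw [show n + 1 = ((n.toNat : Nat) : Int) + 1 by omega, pvRange1]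
    exact pvBuildS_nat n.toNat
  · rw [pvRange1_neg (by omega), show n.toNat = 0 by omega]
    rfl

lemma pvKeys_nat (m : Nat) :
    ((List.range m).map (fun (j : Nat) => (j : Int) + 1)).flatMap
      (fun x => (PySem.List.pyRange 1 (x + 1)).map (fun y => (x, y))) = pvKL m := by
  induction m with
  | zero => rfl
  | succ m ih =>
    rw [List.range_succ, List.map_append, List.flatMap_append, ih]
    simp only [List.map_cons, List.map_nil, List.flatMap_cons, List.flatMap_nil, List.append_nil]
    rw [pvKL]
    congr 1
    rw [show ((m : Nat) : Int) + 1 + 1 = ((m + 1 : Nat) : Int) + 1 by push_cast; ring,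
      pvRange1 (m + 1), List.map_map]
    rw [pvKR]
    refine List.map_congr_left ?_
    intro j _
    simp only [Function.comp_apply]
    rfl

lemma pvKeys_eq (n : Int) : pvKeys n = pvKL n.toNat := by
  rw [pvKeys]
  rcases (by omega : 0 ≤ n ∨ n < 0) with h | h
  · rw [show n + 1 = ((n.toNat : Nat) : Int) + 1 by omega, pvRange1]
    exact pvKeys_nat n.toNat
  · rw [pvRange1_neg (by omega), show n.toNat = 0 by omega]
    rfl

def pvUpd (P : List (Int × Int)) : List ((Int × Int) × Int) :=
  P.map (fun k => (k, pvSN k.1 k.2))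

def pvZero (Q : List (Int × Int)) : List ((Int × Int) × Int) :=
  Q.map (fun k => (k, (0 : Int)))

def pvApp (P : List (Int × Int)) : List ((Int × Int) × Int) :=
  P.filterMap (fun k => if k.1 ≠ k.2 then some ((k.2, k.1), pvSN k.1 k.2 + 1) else none)

lemma pvUpd_append (P Q : List (Int × Int)) : pvUpd (P ++ Q) = pvUpd P ++ pvUpd Q := by
  simp [pvUpd]

lemma pvUpd_fst (P : List (Int × Int)) : (pvUpd P).map Prod.fst = P := by
  simp [pvUpd, List.map_map, Function.comp_def]

lemma pvZero_fst (Q : List (Int × Int)) : (pvZero Q).map Prod.fst = Q := by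
  simp [pvZero, List.map_map, Function.comp_def]

lemma pvApp_fst (P : List (Int × Int)) :
    (pvApp P).map Prod.fst =
      P.filterMap (fun k => if k.1 ≠ k.2 then some (k.2, k.1) else none) := by
  rw [pvApp, List.map_filterMap]
  refine List.filterMap_congr ?_
  intro k _
  split_ifs <;> rfl

lemma mem_pvApp_fst {P : List (Int × Int)} {q : Int × Int}
    (h : q ∈ (pvApp P).map Prod.fst) : ∃ a ∈ P, a.1 ≠ a.2 ∧ q = (a.2, a.1) := by
  rw [pvApp_fst, List.mem_filterMap] at h
  obtain ⟨a, ha, hq⟩ := h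
  refine ⟨a, ha, ?_⟩
  by_cases hne : a.1 ≠ a.2
  · rw [if_pos hne] at hq
    exact ⟨hne, (Option.some_inj.mp hq).symm⟩
  · rw [if_neg hne] at hq
    exact absurd hq (by simp)

lemma pvApp_append (P : List (Int × Int)) (k : Int × Int) :
    pvApp (P ++ [k]) = pvApp P ++
      (if k.1 ≠ k.2 then [((k.2, k.1), pvSN k.1 k.2 + 1)] else []) := by
  rw [pvApp, List.filterMap_append, pvApp]
  congr 1
  split_ifs with h <;> simp [List.filterMap, h]

def pvSw : Nat → List ((Int × Int) × Int)
  | 0 => []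
  | m + 1 => pvSw m ++ (List.range m).map
      (fun (j : Nat) => (((j : Int) + 1, ((m + 1 : Nat) : Int)), pvSN ((m + 1 : Nat) : Int) ((j : Int) + 1) + 1))

lemma mem_pvSw_fst {m : Nat} {q : Int × Int} (h : q ∈ (pvSw m).map Prod.fst) :
    1 ≤ q.1 ∧ q.1 < q.2 ∧ q.2 ≤ (m : Int) := by
  induction m with
  | zero => simp [pvSw] at h
  | succ m ih =>
    rw [pvSw, List.map_append, List.mem_append] at h
    rcases h with h | h
    · have := ih h; push_cast; omega
    · rw [List.map_map, List.mem_map] at h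
      obtain ⟨j, hj, rfl⟩ := h
      rw [List.mem_range] at hj
      simp only [Function.comp_apply]
      push_cast; omega

lemma pvApp_pvKL (m : Nat) : pvApp (pvKL m) = pvSw m := by
  induction m with
  | zero => rfl
  | succ m ih =>
    rw [pvKL, pvApp, List.filterMap_append, ← pvApp, ← pvApp, ih, pvSw]
    congr 1
    rw [pvKR, pvApp, List.filterMap_map, List.range_succ, List.filterMap_append]
    have hlast : List.filterMap
        ((fun k => if k.1 ≠ k.2 then some ((k.2, k.1), pvSN k.1 k.2 + 1) else none) ∘
          (fun (j : Nat) => (((m + 1 : Nat) : Int), (j : Int) + 1))) [m] = [] := by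
      simp only [List.filterMap, Function.comp_apply]
      rw [if_neg (by push_cast; omega)]
    rw [hlast, List.append_nil]
    rw [show (List.map (fun (j : Nat) =>
        (((j : Int) + 1, ((m + 1 : Nat) : Int)), pvSN ((m + 1 : Nat) : Int) ((j : Int) + 1) + 1))
        (List.range m)) = List.filterMap (some ∘ (fun (j : Nat) =>
        (((j : Int) + 1, ((m + 1 : Nat) : Int)), pvSN ((m + 1 : Nat) : Int) ((j : Int) + 1) + 1)))
        (List.range m) from (List.filterMap_eq_map.symm ▸ rfl)]
    refine List.filterMap_congr ?_
    intro j hj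
    rw [List.mem_range] at hj
    simp only [Function.comp_apply]
    rw [if_pos (by push_cast; omega)]

lemma not_contains_of_not_mem {d : PySem.Dict (Int × Int) Int} {k : Int × Int}
    (h : k ∉ d.keys) : d.contains k = false := by
  rw [← Bool.not_eq_true, PySem.Dict.contains_iff_mem_keys]; exact h

lemma pvD1_items (M m : Nat) (hm : m ≤ M) :
    (((List.range m).map (fun (j : Nat) => (j : Int) + 1)).foldl
      (pvFill (pvSL M)) PySem.Dict.empty).items = pvUpd (pvKL m) := by
  induction m with
  | zero => rfl
  | succ m ih =>
    rw [List.range_succ, List.map_append, List.foldl_append]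
    simp only [List.map_cons, List.map_nil, List.foldl_cons, List.foldl_nil]
    set d := ((List.range m).map (fun (j : Nat) => (j : Int) + 1)).foldl
      (pvFill (pvSL M)) PySem.Dict.empty with hd
    have hitems : d.items = pvUpd (pvKL m) := ih (by omega)
    have hkeys : d.keys = pvKL m := by
      rw [PySem.Dict.keys, hitems]; exact pvUpd_fst _
    rw [pvFill]
    rw [show ((m : Nat) : Int) + 1 + 1 = ((m + 1 : Nat) : Int) + 1 by push_cast; ring,
      pvRange1 (m + 1)]
    rw [PySem.Dict.items_foldl_insert_fresh _
      (fun y => (((m : Nat) : Int) + 1, y))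
      (fun y => PySem.List.pyGetD (PySem.List.pyGetD (pvSL M) (((m : Nat) : Int) + 1) []) y 0) d
      ?fresh ?nodup]
    case fresh =>
      intro y hy
      refine not_contains_of_not_mem ?_
      rw [hkeys, mem_pvKL]
      rw [List.mem_map] at hy
      obtain ⟨j, hj, rfl⟩ := hy
      push_cast
      omega
    case nodup =>
      rw [List.map_map]
      refine List.Nodup.map ?_ List.nodup_range
      intro a b hab
      simp only [Function.comp_apply, Prod.mk.injEq] at hab
      omega
    · rw [hitems, show pvKL (m + 1) = pvKL m ++ pvKR (m + 1) from rfl, pvUpd_append]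
      congr 1
      rw [List.map_map, pvKR, pvUpd, List.map_map]
      refine List.map_congr_left ?_
      intro j hj
      rw [List.mem_range] at hj
      simp only [Function.comp_apply]
      have hx : ((m : Nat) : Int) + 1 = ((m + 1 : Nat) : Int) := by push_cast; ring
      rw [hx]
      refine congrArg _ ?_
      exact pvSLookup (by omega) (by push_cast; omega) (by push_cast; omega)

lemma pvD2_items (M m : Nat) (hm : m ≤ M) (d1 : PySem.Dict (Int × Int) Int)
    (h1 : d1.items = pvUpd (pvKL M)) :
    (((List.range m).map (fun (j : Nat) => (j : Int) + 1)).foldl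
      (pvSwapFill (pvSL M)) d1).items = pvUpd (pvKL M) ++ pvSw m := by
  induction m with
  | zero => simpa [pvSw] using h1
  | succ m ih =>
    rw [List.range_succ, List.map_append, List.foldl_append]
    simp only [List.map_cons, List.map_nil, List.foldl_cons, List.foldl_nil]
    set d := ((List.range m).map (fun (j : Nat) => (j : Int) + 1)).foldl
      (pvSwapFill (pvSL M)) d1 with hd
    have hitems : d.items = pvUpd (pvKL M) ++ pvSw m := ih (by omega)
    have hkeys : d.keys = pvKL M ++ (pvSw m).map Prod.fst := by
      rw [PySem.Dict.keys, hitems, List.map_append, pvUpd_fst]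
    rw [pvSwapFill, pvRange1 m]
    rw [PySem.Dict.items_foldl_insert_fresh _
      (fun y => (y, ((m : Nat) : Int) + 1))
      (fun y => PySem.List.pyGetD (PySem.List.pyGetD (pvSL M) (((m : Nat) : Int) + 1) []) y 0 + 1) d
      ?fresh ?nodup]
    case fresh =>
      intro y hy
      rw [List.mem_map] at hy
      obtain ⟨j, hj, rfl⟩ := hy
      rw [List.mem_range] at hj
      refine not_contains_of_not_mem ?_
      rw [hkeys, List.mem_append, mem_pvKL]
      rintro (h | h)
      · simp only at h; omega
      · have := mem_pvSw_fst h; simp only at this; omega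
    case nodup =>
      rw [List.map_map]
      refine List.Nodup.map ?_ List.nodup_range
      intro a b hab
      simp only [Function.comp_apply, Prod.mk.injEq] at hab
      omega
    · rw [hitems, pvSw, List.append_assoc]
      congr 2
      rw [List.map_map]
      refine List.map_congr_left ?_
      intro j hj
      rw [List.mem_range] at hj
      simp only [Function.comp_apply]
      have hx : ((m : Nat) : Int) + 1 = ((m + 1 : Nat) : Int) := by push_cast; ring
      rw [hx]
      refine congrArg _ ?_
      refine congrArg (· + 1) ?_
      exact pvSLookup (by omega) (by push_cast; omega) (by push_cast; omega)

lemma map_replace_of_ne (L : List ((Int × Int) × Int)) (k : Int × Int) (v : Int)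
    (h : ∀ p ∈ L, p.1 ≠ k) :
    L.map (fun p => if p.1 == k then (k, v) else p) = L := by
  have h2 : ∀ p ∈ L, (fun p => if p.1 == k then (k, v) else p) p = id p := by
    intro p hp
    simp only [id]
    rw [if_neg]
    simp only [beq_iff_eq]
    exact h p hp
  rw [List.map_congr_left h2, List.map_id]

lemma pvLoopA_fold (M : Nat) (P Q : List (Int × Int)) (h : pvKL M = P ++ Q) :
    (P.foldl pvLoopA (PySem.Dict.mk (pvZero (pvKL M)))).items
      = pvUpd P ++ pvZero Q ++ pvApp P := by
  induction P using List.reverseRecOn generalizing Q with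
  | nil =>
    simp only [List.foldl_nil, List.nil_append] at h ⊢
    rw [← h]
    simp [pvUpd, pvApp]
  | append_singleton P' k ihP =>
    have h' : pvKL M = P' ++ (k :: Q) := by
      rw [h, List.append_assoc]; rfl
    have hnodup : (P' ++ (k :: Q)).Nodup := by rw [← h']; exact pvKL_nodup M
    obtain ⟨hndP', hndkQ, hdisj⟩ := List.nodup_append.mp hnodup
    have hkP' : ∀ a ∈ P', a ≠ k := by
      intro a ha hak
      subst hak
      exact hdisj a ha a (by simp) rfl
    have hkQ : ∀ a ∈ Q, a ≠ k := by
      intro a ha hak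
      subst hak
      exact (List.nodup_cons.mp hndkQ).1 ha
    have hkmem : k ∈ pvKL M := by rw [h']; simp
    have hkb := mem_pvKL.mp hkmem
    have hP'sub : ∀ a ∈ P', a ∈ pvKL M := by
      intro a ha; rw [h']; exact List.mem_append_left _ ha
    rw [List.foldl_append, List.foldl_cons, List.foldl_nil]
    set d := P'.foldl pvLoopA (PySem.Dict.mk (pvZero (pvKL M))) with hd
    have hitems : d.items = pvUpd P' ++ pvZero (k :: Q) ++ pvApp P' := ihP (k :: Q) h'
    have hkeys : d.keys = (P' ++ (k :: Q)) ++ (pvApp P').map Prod.fst := by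
      rw [PySem.Dict.keys, hitems, List.map_append, List.map_append, pvUpd_fst, pvZero_fst]
    have happb : ∀ q ∈ (pvApp P').map Prod.fst, q.1 < q.2 := by
      intro q hq
      obtain ⟨a, haP', hne, rfl⟩ := mem_pvApp_fst hq
      have := mem_pvKL.mp (hP'sub a haP')
      simp only
      omega
    have hnd : d.keys.Nodup := by
      rw [hkeys]
      rw [List.nodup_append]
      refine ⟨hnodup, ?_, ?_⟩
      · rw [pvApp_fst]
        refine List.Nodup.filterMap ?_ ((List.nodup_append.mp hnodup).1)
        intro a a' b hb hb'
        by_cases ha : a.1 ≠ a.2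
        · rw [if_pos ha] at hb
          by_cases ha' : a'.1 ≠ a'.2
          · rw [if_pos ha'] at hb'
            simp only [Option.mem_def, Option.some_inj] at hb hb'
            rw [← hb'] at hb
            obtain ⟨h1, h2⟩ := Prod.mk.injEq .. ▸ hb
            exact Prod.ext (by rw [← h2]) (by rw [← h1])
          · rw [if_neg ha'] at hb'; exact absurd hb' (by simp)
        · rw [if_neg ha] at hb; exact absurd hb (by simp)
      · intro a ha b hb hab
        subst hab
        have hb2 := happb a hb
        have ha2 : a ∈ pvKL M := by rw [h']; exact ha
        have := mem_pvKL.mp ha2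
        omega
    have hget : d.getD k 0 = 0 := by
      refine PySem.Dict.getD_of_mem_items d ?_ hnd 0
      rw [hitems]
      refine List.mem_append_left _ (List.mem_append_right _ ?_)
      simp [pvZero]
    have hsteps : steps_with_euclids_algorithm k.1 k.2 = pvSN k.1 k.2 := by
      rw [steps_with_euclids_algorithm, pvEuclidGo_eq, zero_add]
    have hcont : d.contains k = true := by
      rw [PySem.Dict.contains_iff_mem_keys, hkeys]
      refine List.mem_append_left _ ?_
      rw [h'] at hkmem
      exact hkmem
    have hmid : (d.insert k (pvSN k.1 k.2)).items
        = pvUpd P' ++ ((k, pvSN k.1 k.2) :: pvZero Q) ++ pvApp P' := by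
      rw [PySem.Dict.items_insert_of_contains d _ hcont, hitems]
      rw [List.map_append, List.map_append]
      congr 1
      · congr 1
        · refine map_replace_of_ne _ _ _ ?_
          intro p hp
          rw [pvUpd, List.mem_map] at hp
          obtain ⟨a, ha, rfl⟩ := hp
          exact hkP' a ha
        · rw [pvZero, List.map_cons, List.map_cons, ← pvZero]
          simp only [beq_self_eq_true, if_pos]
          congr 1
          refine map_replace_of_ne _ _ _ ?_
          intro p hp
          rw [pvZero, List.mem_map] at hp
          obtain ⟨a, ha, rfl⟩ := hp
          exact hkQ a ha
      · refine map_replace_of_ne _ _ _ ?_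
        intro p hp hpk
        have := happb p.1 (List.mem_map_of_mem hp)
        rw [hpk] at this
        omega
    rw [pvLoopA, if_neg (by rw [hget]; simp)]
    simp only [hsteps]
    by_cases hne : k.1 ≠ k.2
    · rw [if_pos hne]
      have hnc : (d.insert k (pvSN k.1 k.2)).contains (k.2, k.1) = false := by
        refine not_contains_of_not_mem ?_
        rw [PySem.Dict.keys, hmid]
        simp only [List.map_append, List.mem_append]
        rintro ((hm | hm) | hm)
        · rw [pvUpd_fst] at hm
          have := mem_pvKL.mp (hP'sub _ hm)
          simp only at this
          omega
        · rw [List.map_cons, pvZero_fst] at hm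
          rcases List.mem_cons.mp hm with hm | hm
          · obtain ⟨h1, h2⟩ := Prod.mk.injEq .. ▸ hm
            omega
          · have hq := hkQ _ hm
            have hq2 : (k.2, k.1) ∈ pvKL M := by
              rw [h']
              refine List.mem_append_right _ (List.mem_cons_of_mem _ hm)
            have := mem_pvKL.mp hq2
            simp only at this
            omega
        · obtain ⟨a, haP', hane, hEq⟩ := mem_pvApp_fst hm
          obtain ⟨h1, h2⟩ := Prod.mk.injEq .. ▸ hEq
          have hak : a = k := Prod.ext (by omega) (by omega)
          exact hkP' a haP' hak
      rw [PySem.Dict.items_insert_of_not_contains _ _ hnc, hmid]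
      rw [pvUpd_append, pvApp_append, if_pos hne]
      simp [pvUpd, pvZero, List.append_assoc]
    · rw [if_neg hne]
      rw [hmid, pvUpd_append, pvApp_append, if_neg hne]
      simp [pvUpd, pvZero, List.append_assoc]

lemma pvD0_items (n : Int) :
    ((pvKeys n).foldl (fun d k => d.insert k 0) PySem.Dict.empty).items
      = pvZero (pvKL n.toNat) := by
  rw [pvKeys_eq]
  rw [PySem.Dict.items_foldl_insert_fresh (pvKL n.toNat) (fun k => k) (fun _ => (0 : Int))
    PySem.Dict.empty (fun a _ => PySem.Dict.contains_empty a)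
    (by simpa using pvKL_nodup n.toNat)]
  rfl

lemma classic_sum_eq (n : Int) :
    classic_sum n = (pvUpd (pvKL n.toNat) ++ pvApp (pvKL n.toNat)).map
      (fun p => (p.1.1, p.1.2, p.2)) := by
  rw [classic_sum]
  have hD0 : ((pvKeys n).foldl (fun d k => d.insert k 0) PySem.Dict.empty)
      = PySem.Dict.mk (pvZero (pvKL n.toNat)) :=
    PySem.Dict.ext (pvD0_items n)
  rw [hD0]
  rw [show (PySem.Dict.mk (pvZero (pvKL n.toNat))).keys = pvKL n.toNat from pvZero_fst _]
  rw [pvLoopA_fold n.toNat (pvKL n.toNat) [] (by simp)]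
  simp [pvZero]

lemma classic_sum_alt_eq (n : Int) :
    classic_sum_alt n = (pvUpd (pvKL n.toNat) ++ pvApp (pvKL n.toNat)).map
      (fun p => (p.1.1, p.1.2, p.2)) := by
  rw [classic_sum_alt, pvBuildS_eq, pvApp_pvKL]
  rcases (by omega : 0 ≤ n ∨ n < 0) with h | h
  · rw [show n + 1 = ((n.toNat : Nat) : Int) + 1 by omega, pvRange1]
    have hd1 : ((List.range n.toNat).map (fun (j : Nat) => (j : Int) + 1)).foldl
        (pvFill (pvSL n.toNat)) PySem.Dict.empty
        = PySem.Dict.mk (pvUpd (pvKL n.toNat)) :=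
      PySem.Dict.ext (pvD1_items n.toNat n.toNat le_rfl)
    rw [hd1]
    have h2 := pvD2_items n.toNat n.toNat le_rfl (PySem.Dict.mk (pvUpd (pvKL n.toNat))) rfl
    rw [h2]
  · rw [pvRange1_neg (by omega), show n.toNat = 0 by omega]
    rfl

-- ===== VERDICT (by name: the statement is the Claim_ definition above) =====
theorem classic_sum_spec : Claim_equal_classic_sum := by
  intro n _
  unfold Spec_classic_sum
  rw [classic_sum_eq, classic_sum_alt_eq]
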